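-- pv_equiv track=rewrite | github.com/rezanadali/spn | main.py | str2bin16
-- ===== SOURCE A (Python) =====
-- def str2bin16(s):                                      # for transfering of binary strings to binary
--     x=int(s)
--     z=0
--     for i in range(0,16):
--         y = x%(10)
--         z = z+(y*(2**i))
--         x//=(10)
--     return z
-- ===== SOURCE B (Python) =====
-- def str2bin16(s):
--     x = int(s)
--     z = 0
--     for i in range(15, -1, -1):
--         z = z * 2 + (x // 10**i) % 10
--     return z
-- ===== Notes on version B (the rewrite author's own statement) =====
-- stated objective: alternative
-- what changed: B evaluates the same 16-digit reinterpretation by Horner's rule: a single accumulator z = z*2 + (x // 10**i) % 10 walking digit positions from most significant to least, instead of A's least-significant-first loop that tracks mutable x and explicit powers 2**i.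
import Mathlib
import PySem

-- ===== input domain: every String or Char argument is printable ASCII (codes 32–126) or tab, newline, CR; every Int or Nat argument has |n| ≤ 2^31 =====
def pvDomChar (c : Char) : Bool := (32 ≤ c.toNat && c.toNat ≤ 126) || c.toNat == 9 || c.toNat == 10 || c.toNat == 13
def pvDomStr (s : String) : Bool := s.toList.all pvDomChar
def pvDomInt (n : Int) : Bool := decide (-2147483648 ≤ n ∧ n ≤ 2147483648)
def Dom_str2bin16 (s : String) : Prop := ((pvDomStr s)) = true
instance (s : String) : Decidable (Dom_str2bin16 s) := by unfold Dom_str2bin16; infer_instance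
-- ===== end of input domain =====

-- B replaces A's per-digit powers-of-two sum with a Horner-rule fold over the digit positions, most significant first (alternative decomposition, same cost).
-- ===== PORT A =====
-- literal port of A: x=int(s); for i in range(16): y=x%10; z+=y*2**i; x//=10
def str2bin16 (s : String) : Int :=
  match PySem.Int.ofStr? s with
  | none => 0  -- int(s) raises ValueError; excluded by Pre_
  | some x0 =>
    ((PySem.List.pyRange 0 16 1).foldl
      (fun (st : Int × Int) i =>
        let y := PySem.Int.mod st.1 10
        (PySem.Int.floordiv st.1 10, st.2 + y * 2 ^ i.toNat)) (x0, 0)).2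

-- ===== PORT B =====
-- port of B: Horner's rule, most-significant digit position first
def str2bin16_alt (s : String) : Int :=
  match PySem.Int.ofStr? s with
  | none => 0  -- int(s) raises ValueError; excluded by Pre_
  | some x =>
    (PySem.List.pyRange 15 (-1) (-1)).foldl
      (fun z i => z * 2 + PySem.Int.mod (PySem.Int.floordiv x (10 ^ i.toNat)) 10) 0

-- ===== PRECONDITION & SPEC =====
-- Pre_ excludes exactly the strings on which int(s) raises ValueError in both A and B
def Pre_str2bin16 (s : String) : Prop := (PySem.Int.ofStr? s).isSome = true
instance (s : String) : Decidable (Pre_str2bin16 s) := by unfold Pre_str2bin16; infer_instance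
def pvWitness_str2bin16 : String := "1011"

def Spec_str2bin16 (s : String) (out : Int) : Prop := out = str2bin16_alt s
instance (s : String) (out : Int) : Decidable (Spec_str2bin16 s out) := by unfold Spec_str2bin16; infer_instance

-- ===== CLAIM (what is proved, stated in full; the proofs are below) =====
def Claim_equal_str2bin16 : Prop := ∀ (s : String), Dom_str2bin16 s → Pre_str2bin16 s → Spec_str2bin16 s (str2bin16 s)

-- ===== LEMMAS AND PROOFS =====

def digitSum (x : Int) : Nat → Int
  | 0 => 0
  | n+1 => digitSum x n + PySem.Int.mod (PySem.Int.floordiv x (10 ^ n)) 10 * 2 ^ n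

theorem fd_step (x : Int) (n : Nat) :
    PySem.Int.floordiv (PySem.Int.floordiv x (10 ^ n)) 10
      = PySem.Int.floordiv x (10 ^ (n + 1)) := by
  rw [PySem.Int.floordiv_eq_ediv_of_pos (by positivity),
      PySem.Int.floordiv_eq_ediv_of_pos (by positivity),
      PySem.Int.floordiv_eq_ediv_of_pos (by positivity),
      Int.ediv_ediv_of_nonneg (by positivity), pow_succ]

theorem loopA (x : Int) : ∀ (n : Nat) (z : Int),
    (PySem.List.pyRange 0 (n : Int) 1).foldl
      (fun (st : Int × Int) i =>
        let y := PySem.Int.mod st.1 10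
        (PySem.Int.floordiv st.1 10, st.2 + y * 2 ^ i.toNat)) (x, z)
    = (PySem.Int.floordiv x (10 ^ n), z + digitSum x n) := by
  intro n
  induction n with
  | zero =>
    intro z
    rw [Nat.cast_zero, PySem.List.pyRange_one_eq_nil (le_refl 0)]
    rw [show ((10:Int) ^ (0:Nat)) = 1 from pow_zero 10,
        PySem.Int.floordiv_eq_ediv_of_pos (by norm_num), Int.ediv_one]
    simp [digitSum]
  | succ n ih =>
    intro z
    rw [show ((n + 1 : Nat) : Int) = (n : Int) + 1 by push_cast; ring,
        PySem.List.pyRange_one_succ_right (Int.natCast_nonneg n),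
        List.foldl_append, ih]
    simp only [List.foldl]
    rw [fd_step, Int.toNat_natCast]
    simp [digitSum]
    ring

theorem loopB (x : Int) : ∀ (n : Nat) (z : Int),
    (PySem.List.pyRange ((n : Int) - 1) (-1) (-1)).foldl
      (fun z i => z * 2 + PySem.Int.mod (PySem.Int.floordiv x (10 ^ i.toNat)) 10) z
    = z * 2 ^ n + digitSum x n := by
  intro n
  induction n with
  | zero =>
    intro z
    rw [Nat.cast_zero, PySem.List.pyRange_neg_one_eq_nil (by norm_num)]
    simp [digitSum]
  | succ n ih =>
    intro z
    rw [show ((n + 1 : Nat) : Int) - 1 = (n : Int) by push_cast; ring,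
        PySem.List.pyRange_neg_one_cons (by omega)]
    simp only [List.foldl]
    rw [Int.toNat_natCast, ih]
    simp [digitSum]
    ring

theorem loops_agree (x : Int) :
    (((PySem.List.pyRange 0 16 1).foldl
      (fun (st : Int × Int) i =>
        let y := PySem.Int.mod st.1 10
        (PySem.Int.floordiv st.1 10, st.2 + y * 2 ^ i.toNat)) (x, 0)).2 : Int)
    = (PySem.List.pyRange 15 (-1) (-1)).foldl
        (fun z i => z * 2 + PySem.Int.mod (PySem.Int.floordiv x (10 ^ i.toNat)) 10) 0 := by
  have hA := loopA x 16 0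
  have hB := loopB x 16 0
  simp only [Nat.cast_ofNat] at hA hB
  rw [show (16:Int) - 1 = 15 by norm_num] at hB
  rw [hA, hB]
  norm_num

-- ===== VERDICT (by name: the statement is the Claim_ definition above) =====
theorem str2bin16_spec : Claim_equal_str2bin16 := by
  intro s _ hpre
  unfold Spec_str2bin16 str2bin16 str2bin16_alt
  cases h : PySem.Int.ofStr? s with
  | none => rfl
  | some x => exact loops_agree x
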